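-- pv_equiv track=rewrite | github.com/MuniZ-byte/Cubemdl | cubedev_utils.py | detect_column_purpose
-- ===== SOURCE A (Python) =====
-- def detect_column_purpose(column_name: str, column_type: str) -> str:
--     """Detect the purpose/category of a column"""
--     col_name = column_name.lower()
--
--     # Primary key detection
--     if col_name in ['id', 'uuid'] or col_name.endswith('_id'):
--         return 'identifier'
--
--     # Time column detection
--     if any(term in col_name for term in ['date', 'time', 'timestamp', 'created', 'updated']):
--         return 'time'
--
--     # Financial column detection
--     if any(term in col_name for term in ['amount', 'price', 'cost', 'value', 'total', 'revenue']):
--         return 'financial'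
--
--     # Quantity/metric detection
--     if any(term in col_name for term in ['quantity', 'count', 'volume', 'weight', 'score']):
--         return 'metric'
--
--     # Status/category detection
--     if any(term in col_name for term in ['status', 'type', 'category', 'state', 'kind']):
--         return 'categorical'
--
--     # Name/description detection
--     if any(term in col_name for term in ['name', 'title', 'description', 'label']):
--         return 'descriptive'
--
--     # Boolean detection
--     if col_name.startswith('is_') or col_name.startswith('has_') or 'boolean' in column_type.lower():
--         return 'boolean'
--
--     return 'generic'
-- ===== SOURCE B (Python) =====
-- _KEYWORDS = [
--     ('date', 'time'), ('time', 'time'), ('timestamp', 'time'),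
--     ('created', 'time'), ('updated', 'time'),
--     ('amount', 'financial'), ('price', 'financial'), ('cost', 'financial'),
--     ('value', 'financial'), ('total', 'financial'), ('revenue', 'financial'),
--     ('quantity', 'metric'), ('count', 'metric'), ('volume', 'metric'),
--     ('weight', 'metric'), ('score', 'metric'),
--     ('status', 'categorical'), ('type', 'categorical'), ('category', 'categorical'),
--     ('state', 'categorical'), ('kind', 'categorical'),
--     ('name', 'descriptive'), ('title', 'descriptive'),
--     ('description', 'descriptive'), ('label', 'descriptive'),
-- ]
--
-- _ORDER = ['identifier', 'time', 'financial', 'metric', 'categorical',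
--           'descriptive', 'boolean']
--
--
-- def detect_column_purpose(column_name: str, column_type: str) -> str:
--     """Detect the purpose/category of a column.
--
--     Gather ALL matching categories in one flat pass over a keyword table,
--     then return the highest-priority one.
--     """
--     n = column_name.lower()
--     matched = {label for kw, label in _KEYWORDS if kw in n}
--     if n in ('id', 'uuid') or n.endswith('_id'):
--         matched.add('identifier')
--     if n.startswith('is_') or n.startswith('has_') or 'boolean' in column_type.lower():
--         matched.add('boolean')
--     for label in _ORDER:
--         if label in matched:
--             return label
--     return 'generic'
-- ===== Notes on version B (the rewrite author's own statement) =====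
-- stated objective: alternative
-- what changed: Instead of a short-circuiting if-cascade per category, B makes one flat pass over a keyword->label table collecting the SET of all matching categories (plus the two non-substring rules), then a second pass over a priority list returns the first collected label.
import Mathlib
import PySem

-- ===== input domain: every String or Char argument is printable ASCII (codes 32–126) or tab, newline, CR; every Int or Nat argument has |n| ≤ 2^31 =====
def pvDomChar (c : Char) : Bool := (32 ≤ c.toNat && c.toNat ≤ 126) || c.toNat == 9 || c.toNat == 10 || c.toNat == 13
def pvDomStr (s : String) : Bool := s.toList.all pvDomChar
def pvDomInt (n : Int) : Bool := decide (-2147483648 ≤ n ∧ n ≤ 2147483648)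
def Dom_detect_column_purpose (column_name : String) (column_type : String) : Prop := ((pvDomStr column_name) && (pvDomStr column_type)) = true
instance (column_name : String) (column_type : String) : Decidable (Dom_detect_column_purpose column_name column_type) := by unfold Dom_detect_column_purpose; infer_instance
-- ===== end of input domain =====

-- B replaces A's short-circuiting per-category if-cascade by a flat keyword-table pass that
-- collects the SET of all matching categories, followed by a priority-order scan (alternative).

-- ===== PORT A =====
def detect_column_purpose (column_name : String) (column_type : String) : String :=
  let col_name := PySem.Str.lower column_name
  if (col_name == "id" || col_name == "uuid") || PySem.Str.endswith col_name "_id" then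
    "identifier"
  else if ["date", "time", "timestamp", "created", "updated"].any
      (fun term => PySem.Str.isIn term col_name) then
    "time"
  else if ["amount", "price", "cost", "value", "total", "revenue"].any
      (fun term => PySem.Str.isIn term col_name) then
    "financial"
  else if ["quantity", "count", "volume", "weight", "score"].any
      (fun term => PySem.Str.isIn term col_name) then
    "metric"
  else if ["status", "type", "category", "state", "kind"].any
      (fun term => PySem.Str.isIn term col_name) then
    "categorical"
  else if ["name", "title", "description", "label"].any
      (fun term => PySem.Str.isIn term col_name) then
    "descriptive"
  else if PySem.Str.startswith col_name "is_" || PySem.Str.startswith col_name "has_"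
      || PySem.Str.isIn "boolean" (PySem.Str.lower column_type) then
    "boolean"
  else
    "generic"

-- ===== PORT B =====
-- flat keyword -> category table (one pass over this collects all matching categories)
def pvKeywords : List (String × String) :=
  [ ("date", "time"), ("time", "time"), ("timestamp", "time"),
    ("created", "time"), ("updated", "time"),
    ("amount", "financial"), ("price", "financial"), ("cost", "financial"),
    ("value", "financial"), ("total", "financial"), ("revenue", "financial"),
    ("quantity", "metric"), ("count", "metric"), ("volume", "metric"),
    ("weight", "metric"), ("score", "metric"),
    ("status", "categorical"), ("type", "categorical"), ("category", "categorical"),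
    ("state", "categorical"), ("kind", "categorical"),
    ("name", "descriptive"), ("title", "descriptive"),
    ("description", "descriptive"), ("label", "descriptive") ]

def pvOrder : List String :=
  ["identifier", "time", "financial", "metric", "categorical", "descriptive", "boolean"]

-- second pass: first label of the priority list present in the matched set
def pvFirstIn (s : PySem.Set String) : List String → String
  | [] => "generic"
  | l :: rest => if PySem.Set.contains s l then l else pvFirstIn s rest

def detect_column_purpose_alt (column_name : String) (column_type : String) : String :=
  let n := PySem.Str.lower column_name
  let matched0 : PySem.Set String :=
    PySem.Set.ofList ((pvKeywords.filter (fun p => PySem.Str.isIn p.1 n)).map Prod.snd)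
  let matched1 :=
    if (n == "id" || n == "uuid") || PySem.Str.endswith n "_id" then
      PySem.Set.add matched0 "identifier" else matched0
  let matched :=
    if PySem.Str.startswith n "is_" || PySem.Str.startswith n "has_"
        || PySem.Str.isIn "boolean" (PySem.Str.lower column_type) then
      PySem.Set.add matched1 "boolean" else matched1
  pvFirstIn matched pvOrder

-- ===== PRECONDITION & SPEC =====
def Spec_detect_column_purpose (column_name : String) (column_type : String) (out : String) : Prop := out = detect_column_purpose_alt column_name column_type
instance (column_name : String) (column_type : String) (out : String) : Decidable (Spec_detect_column_purpose column_name column_type out) := by unfold Spec_detect_column_purpose; infer_instance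

-- ===== CLAIM (what is proved, stated in full; the proofs are below) =====
def Claim_equal_detect_column_purpose : Prop := ∀ (column_name : String) (column_type : String), Dom_detect_column_purpose column_name column_type → Spec_detect_column_purpose column_name column_type (detect_column_purpose column_name column_type)

-- ===== LEMMAS AND PROOFS =====

lemma contains_ofList (L : String) (l : List String) :
    PySem.Set.contains (PySem.Set.ofList l) L = l.contains L := by
  rw [Bool.eq_iff_iff]
  simp [PySem.Set.contains, PySem.Set.mem_ofList]

lemma contains_add (s : PySem.Set String) (x L : String) :
    PySem.Set.contains (PySem.Set.add s x) L = (PySem.Set.contains s L || L == x) := by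
  rw [Bool.eq_iff_iff]
  simp [PySem.Set.contains, PySem.Set.mem_add]

lemma contains_filter_map (n L : String) :
    (PySem.Set.ofList ((pvKeywords.filter (fun p => PySem.Str.isIn p.1 n)).map Prod.snd)).contains L
    = pvKeywords.any (fun p => p.2 == L && PySem.Str.isIn p.1 n) := by
  rw [contains_ofList, Bool.eq_iff_iff]
  simp [List.any_eq_true, List.mem_filter, List.mem_map]

lemma contains_ite (c : Prop) [Decidable c] (a b : PySem.Set String) (L : String) :
    PySem.Set.contains (if c then a else b) L
    = if c then PySem.Set.contains a L else PySem.Set.contains b L := by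
  split <;> rfl

-- ===== VERDICT (by name: the statement is the Claim_ definition above) =====
set_option maxHeartbeats 1000000 in
theorem detect_column_purpose_spec : Claim_equal_detect_column_purpose := by
  intro column_name column_type _
  show detect_column_purpose column_name column_type = detect_column_purpose_alt column_name column_type
  unfold detect_column_purpose detect_column_purpose_alt
  simp only [pvOrder, pvFirstIn, contains_ite, contains_add, contains_filter_map]
  simp only [pvKeywords, List.any_cons, List.any_nil]
  simp
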